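-- pv_equiv track=rewrite | github.com/Esya-rae/AoC2024 | 21/A2.py | dir_options
-- ===== SOURCE A (Python) =====
-- from itertools import permutations
--
-- def to_dir_coord(x):
--     if x == 'A':
--         return 0, 2
--     elif x == '^':
--         return 0, 1
--     elif x == '>':
--         return 1, 2
--     elif x == '<':
--         return 1, 0
--     else:
--         return 1, 1
--
-- def dir_is_valid(x, seq):
--     c_i, c_j = to_dir_coord(x)
--     k = 0
--     while k < len(seq) and (c_i != 0 or c_j != 0):
--         if seq[k] == '^':
--             c_i -= 1
--         elif seq[k] == 'v':
--             c_i += 1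
--         elif seq[k] == '<':
--             c_j -= 1
--         else:
--             c_j += 1
--         k += 1
--     return k == len(seq) and (c_i != 0 or c_j != 0)
--
-- def dir_options(x, y):
--     x_i, x_j = to_dir_coord(x)
--     y_i, y_j = to_dir_coord(y)
--     seq = ''
--     if y_i > x_i:
--         seq += 'v' * (y_i - x_i)
--     else:
--         seq += '^' * (x_i - y_i)
--     if y_j > x_j:
--         seq += '>' * (y_j - x_j)
--     else:
--         seq += '<' * (x_j - y_j)
--     options = permutations(seq)
--     v = set()
--     for o in options:
--         oo = ''.join(o)
--         if dir_is_valid(x, oo):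
--             v.add(oo)
--     return v
-- ===== SOURCE B (Python) =====
-- def dir_options(x, y):
--     coords = {'A': (0, 2), '^': (0, 1), '>': (1, 2), '<': (1, 0)}
--     x_i, x_j = coords.get(x, (1, 1))
--     y_i, y_j = coords.get(y, (1, 1))
--     vc, nv = ('v', y_i - x_i) if y_i > x_i else ('^', x_i - y_i)
--     hc, nh = ('>', y_j - x_j) if y_j > x_j else ('<', x_j - y_j)
--     di = 1 if vc == 'v' else -1
--     dj = 1 if hc == '>' else -1
--     out = set()
--
--     def go(i, j, rv, rh, path):
--         if rv == 0 and rh == 0: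
--             out.add(path)
--             return
--         if rv:
--             ni = i + di
--             if (ni, j) != (0, 0):
--                 go(ni, j, rv - 1, rh, path + vc)
--         if rh:
--             nj = j + dj
--             if (i, nj) != (0, 0):
--                 go(i, nj, rv, rh - 1, path + hc)
--
--     go(x_i, x_j, nv, nh, '')
--     return out
-- ===== Notes on version B (the rewrite author's own statement) =====
-- stated objective: alternative
-- what changed: Replaces generate-all-permutations-then-filter-and-dedup with a pruned DFS over the remaining vertical/horizontal move counts that emits each valid sequence exactly once, pruning a branch the moment a move lands on (0,0).
import Mathlib
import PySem

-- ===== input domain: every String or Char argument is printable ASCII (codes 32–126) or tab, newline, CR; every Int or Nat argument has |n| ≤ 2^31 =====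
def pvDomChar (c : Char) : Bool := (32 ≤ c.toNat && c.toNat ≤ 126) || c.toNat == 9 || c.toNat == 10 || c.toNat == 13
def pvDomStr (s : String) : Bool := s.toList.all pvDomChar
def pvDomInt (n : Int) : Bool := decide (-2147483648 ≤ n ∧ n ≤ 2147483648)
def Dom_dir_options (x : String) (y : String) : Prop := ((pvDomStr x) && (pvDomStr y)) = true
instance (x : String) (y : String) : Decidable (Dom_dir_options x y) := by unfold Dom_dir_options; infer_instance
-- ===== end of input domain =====

-- B replaces A's permutations-generate-then-filter by a pruned DFS over the remaining
-- vertical/horizontal move counts (objective: alternative algorithm, same tiny cost).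

-- ===== PORT A =====
def to_dir_coord (x : String) : Int × Int :=
  if x = "A" then (0, 2)
  else if x = "^" then (0, 1)
  else if x = ">" then (1, 2)
  else if x = "<" then (1, 0)
  else (1, 1)

-- the while-loop of dir_is_valid, on the precomputed coordinates of x
def pv_validLoop : Int → Int → List Char → Bool
  | ci, cj, [] => !(ci == 0 && cj == 0)
  | ci, cj, c :: rest =>
    if ci == 0 && cj == 0 then false
    else if c = '^' then pv_validLoop (ci - 1) cj rest
    else if c = 'v' then pv_validLoop (ci + 1) cj rest
    else if c = '<' then pv_validLoop ci (cj - 1) rest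
    else pv_validLoop ci (cj + 1) rest

-- dir_is_valid's first step is to_dir_coord(x); the caller passes that coordinate pair (exact)
def dir_is_valid (p : Int × Int) (seq : List Char) : Bool :=
  pv_validLoop p.1 p.2 seq

-- itertools.permutations: pick each element in index order, then permute the rest
def pv_picks : List Char → List (Char × List Char)
  | [] => []
  | c :: rest => (c, rest) :: (pv_picks rest).map (fun p => (p.1, c :: p.2))

def pv_permsAux : Nat → List Char → List (List Char)
  | 0, _ => [[]]
  | n + 1, l => (pv_picks l).flatMap (fun p => (pv_permsAux n p.2).map (p.1 :: ·))

def pv_perms (l : List Char) : List (List Char) := pv_permsAux l.length l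

def dirOptionsCoreA (p q : Int × Int) : List String :=
  let seq := (if q.1 > p.1 then List.replicate (q.1 - p.1).toNat 'v'
              else List.replicate (p.1 - q.1).toNat '^')
          ++ (if q.2 > p.2 then List.replicate (q.2 - p.2).toNat '>'
              else List.replicate (p.2 - q.2).toNat '<')
  (pv_perms seq).foldl
    (fun v o => if dir_is_valid p o then PySem.Set.add v (String.ofList o) else v)
    PySem.Set.empty

def dir_options (x : String) (y : String) : List String :=
  dirOptionsCoreA (to_dir_coord x) (to_dir_coord y)

-- ===== PORT B =====
def to_dir_coord_b (x : String) : Int × Int :=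
  PySem.Dict.getD (PySem.Dict.ofList [("A", ((0 : Int), (2 : Int))), ("^", (0, 1)), (">", (1, 2)), ("<", (1, 0))]) x (1, 1)

-- DFS over remaining move counts; fuel = rv + rh (structural totalisation of Source B's recursion)
def pv_go (di dj : Int) (vc hc : Char) :
    Nat → Int → Int → Nat → Nat → List Char → List String → List String
  | 0, _, _, _, _, path, acc => PySem.Set.add acc (String.ofList path)
  | fuel + 1, i, j, rv, rh, path, acc =>
    if rv = 0 ∧ rh = 0 then PySem.Set.add acc (String.ofList path)
    else
      let acc1 :=
        if rv ≠ 0 then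
          let ni := i + di
          if ni = 0 ∧ j = 0 then acc
          else pv_go di dj vc hc fuel ni j (rv - 1) rh (path ++ [vc]) acc
        else acc
      if rh ≠ 0 then
        let nj := j + dj
        if i = 0 ∧ nj = 0 then acc1
        else pv_go di dj vc hc fuel i nj rv (rh - 1) (path ++ [hc]) acc1
      else acc1

def dirOptionsCoreB (p q : Int × Int) : List String :=
  let v := if q.1 > p.1 then ('v', (q.1 - p.1).toNat) else ('^', (p.1 - q.1).toNat)
  let h := if q.2 > p.2 then ('>', (q.2 - p.2).toNat) else ('<', (p.2 - q.2).toNat)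
  let di : Int := if v.1 = 'v' then 1 else -1
  let dj : Int := if h.1 = '>' then 1 else -1
  pv_go di dj v.1 h.1 (v.2 + h.2) p.1 p.2 v.2 h.2 [] PySem.Set.empty

def dir_options_alt (x : String) (y : String) : List String :=
  dirOptionsCoreB (to_dir_coord_b x) (to_dir_coord_b y)

-- ===== PRECONDITION & SPEC =====
def Spec_dir_options (x : String) (y : String) (out : List String) : Prop := out = dir_options_alt x y
instance (x : String) (y : String) (out : List String) : Decidable (Spec_dir_options x y out) := by unfold Spec_dir_options; infer_instance

-- ===== CLAIM (what is proved, stated in full; the proofs are below) =====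
def Claim_equal_dir_options : Prop := ∀ (x : String) (y : String), Dom_dir_options x y → Spec_dir_options x y (dir_options x y)

-- ===== LEMMAS AND PROOFS =====
theorem coordb_eq (x : String) : to_dir_coord_b x = to_dir_coord x := by
  have hitems : (PySem.Dict.ofList
      [("A", ((0 : Int), (2 : Int))), ("^", (0, 1)), (">", (1, 2)), ("<", (1, 0))]).items
      = [("A", ((0 : Int), (2 : Int))), ("^", (0, 1)), (">", (1, 2)), ("<", (1, 0))] := by decide
  simp only [to_dir_coord_b, PySem.Dict.getD, PySem.Dict.get?, hitems, List.find?]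
  by_cases h1 : ("A" == x) = true
  · obtain rfl := beq_iff_eq.mp h1; decide
  by_cases h2 : ("^" == x) = true
  · obtain rfl := beq_iff_eq.mp h2; decide
  by_cases h3 : (">" == x) = true
  · obtain rfl := beq_iff_eq.mp h3; decide
  by_cases h4 : ("<" == x) = true
  · obtain rfl := beq_iff_eq.mp h4; decide
  simp only [Bool.not_eq_true] at h1 h2 h3 h4
  have n1 := Ne.symm (beq_eq_false_iff_ne.mp h1)
  have n2 := Ne.symm (beq_eq_false_iff_ne.mp h2)
  have n3 := Ne.symm (beq_eq_false_iff_ne.mp h3)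
  have n4 := Ne.symm (beq_eq_false_iff_ne.mp h4)
  simp [h1, h2, h3, h4, to_dir_coord, n1, n2, n3, n4]

theorem coord_cases (x : String) :
    to_dir_coord x = (0, 2) ∨ to_dir_coord x = (0, 1) ∨ to_dir_coord x = (1, 2) ∨
    to_dir_coord x = (1, 0) ∨ to_dir_coord x = (1, 1) := by
  unfold to_dir_coord; split_ifs <;> simp

-- ===== VERDICT (by name: the statement is the Claim_ definition above) =====
theorem dir_options_spec : Claim_equal_dir_options := by
  intro x y _
  unfold Spec_dir_options dir_options dir_options_alt
  rw [coordb_eq, coordb_eq]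
  rcases coord_cases x with hx | hx | hx | hx | hx <;>
    rcases coord_cases y with hy | hy | hy | hy | hy <;>
      rw [hx, hy] <;> decide
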